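-- pv_equiv track=rewrite | github.com/kunnyCode/practiceCodingTest | 이것이코딩테스트다/DFSBFS/괄호변환.py | solution
-- ===== SOURCE A (Python) =====
-- def solution(p):
--
--     def dfs(p):
--         if p == "":
--             return ""
--
--         bracket_set = []
--         forward = ""
--         backward = ""
--
--         for i in range(len(p)):
--             bracket_set.append(p[i])
--             if bracket_set.count('(') == bracket_set.count(')'):
--                 forward = p[:i+1]
--                 backward = p[i+1:]
--                 break
--
--         check_right = forward
--         empty = ""
--         for i in range(len(check_right)//2):
--             check_right = check_right.replace("()", "", 1)
--
--         if len(check_right) == 0: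
--             arranged_backward = dfs(backward)
--             return forward + arranged_backward
--
--         else:
--             arranged_backward = dfs(backward)
--             empty = '('
--             empty = empty + arranged_backward
--             empty = empty + ')'
--
--             trim_forward = forward[1:-1]
--             temp_forward = []
--             if len(trim_forward) != 0:
--                 for i in trim_forward:
--                     if i == '(':
--                         temp_forward.append(')')
--                     else:
--                         temp_forward.append('(')
--             temp_forward = "".join(temp_forward)
--
--             return empty + temp_forward
--     answer = dfs(p)
--
--
--     return answer
-- ===== SOURCE B (Python) =====
-- # B: iterative loop with a suffix stack; one running-balance pass per segment
-- # instead of A's repeated count/replace scans and recursion.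
-- def solution(p):
--     parts = []
--     suffixes = []
--     s = p
--     while s:
--         bal = 0
--         cut = 0
--         for i, ch in enumerate(s):
--             if ch == '(':
--                 bal += 1
--             elif ch == ')':
--                 bal -= 1
--             if bal == 0:
--                 cut = i + 1
--                 break
--         else:
--             # no prefix with equal counts: this segment contributes nothing
--             break
--         u, s = s[:cut], s[cut:]
--         ok = True
--         b = 0
--         for ch in u:
--             if ch == '(':
--                 b += 1
--             elif ch == ')':
--                 b -= 1
--             else:
--                 ok = False
--                 break
--             if b < 0:
--                 ok = False
--                 break
--         if ok:
--             parts.append(u)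
--         else:
--             parts.append('(')
--             suffixes.append(')' + ''.join(')' if c == '(' else '(' for c in u[1:-1]))
--     while suffixes:
--         parts.append(suffixes.pop())
--     return ''.join(parts)
-- ===== Notes on version B (the rewrite author's own statement) =====
-- stated objective: faster
-- what changed: A recurses per segment, recounting a growing bracket list at every index, testing correctness by repeatedly deleting the first open-close pair with str.replace, and concatenating strings at every recursion level; B is an iterative loop with a suffix stack that finds each split and tests correctness in a single running-balance pass and joins the output pieces once at the end.
import Mathlib
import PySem

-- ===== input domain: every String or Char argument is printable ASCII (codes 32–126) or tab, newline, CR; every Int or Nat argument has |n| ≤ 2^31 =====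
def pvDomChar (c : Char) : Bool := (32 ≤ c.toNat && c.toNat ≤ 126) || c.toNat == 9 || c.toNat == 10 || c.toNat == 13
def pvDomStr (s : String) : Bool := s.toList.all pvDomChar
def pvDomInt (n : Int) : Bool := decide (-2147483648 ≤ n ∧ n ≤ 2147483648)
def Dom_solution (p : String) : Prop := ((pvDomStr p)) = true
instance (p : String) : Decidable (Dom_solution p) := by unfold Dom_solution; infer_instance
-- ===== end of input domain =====

-- B replaces A's quadratic count/replace scans by one running-balance pass per segment; same return value.

-- ===== PORT A =====

-- Python's one-shot replace in A: remove the first open-close pair (no-op if absent).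
def repl1 : List Char → List Char
  | [] => []
  | [c] => [c]
  | c :: d :: r => if c = '(' ∧ d = ')' then r else c :: repl1 (d :: r)

-- A's first loop: append p[i] to bracket_set, break (returning i+1) when counts match.
def findA : List Char → List Char → Nat → Option Nat
  | _, [], _ => none
  | bs, c :: rest, i =>
    let bs' := bs ++ [c]
    if bs'.count '(' = bs'.count ')' then some (i + 1) else findA bs' rest (i + 1)

-- needed by dfsA's termination proof
theorem findA_pos : ∀ (l bs : List Char) (i m : Nat), findA bs l i = some m → i < m := by
  intro l
  induction l with
  | nil => intro bs i m h; simp [findA] at h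
  | cons c rest ih =>
    intro bs i m h
    simp only [findA] at h
    split at h
    · simp only [Option.some.injEq] at h; omega
    · have := ih _ _ _ h; omega

def flipA (c : Char) : Char := if c = '(' then ')' else '('

def dfsA (p : List Char) : List Char :=
  if hp : p = [] then []
  else
    match hm : findA [] p 0 with
    | none =>
        -- loop ended with no break: forward = "", backward = ""
        let fw : List Char := []
        let bw : List Char := []
        let chk := (List.range (fw.length / 2)).foldl (fun s _ => repl1 s) fw
        if chk = [] then fw ++ dfsA bw
        else
          let trim := (fw.drop 1).dropLast
          ('(' :: dfsA bw ++ [')']) ++ (if trim.length ≠ 0 then trim.map flipA else [])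
    | some m =>
        let fw := p.take m
        let bw := p.drop m
        let chk := (List.range (fw.length / 2)).foldl (fun s _ => repl1 s) fw
        if chk = [] then fw ++ dfsA bw
        else
          let trim := (fw.drop 1).dropLast
          ('(' :: dfsA bw ++ [')']) ++ (if trim.length ≠ 0 then trim.map flipA else [])
termination_by p.length
decreasing_by
  all_goals
    first
      | (have h2 := List.length_pos_of_ne_nil hp; simp only [List.length_nil]; omega)
      | (have h1 := findA_pos _ _ _ _ hm
         have h2 := List.length_pos_of_ne_nil hp
         simp only [List.length_drop]; omega)

def solution (p : String) : String := String.ofList (dfsA p.toList)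

-- ===== PORT B =====

-- B's split loop: one running balance, stop at the first index where it is 0.
def findB : List Char → Int → Nat → Option Nat
  | [], _, _ => none
  | c :: rest, b, i =>
    let b' := if c = '(' then b + 1 else if c = ')' then b - 1 else b
    if b' = 0 then some (i + 1) else findB rest b' (i + 1)

-- needed by dfsB's termination proof
theorem findB_pos : ∀ (l : List Char) (b : Int) (i m : Nat), findB l b i = some m → i < m := by
  intro l
  induction l with
  | nil => intro b i m h; simp [findB] at h
  | cons c rest ih =>
    intro b i m h
    simp only [findB] at h
    by_cases hz : (if c = '(' then b + 1 else if c = ')' then b - 1 else b) = 0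
    · rw [if_pos hz] at h; simp only [Option.some.injEq] at h; omega
    · rw [if_neg hz] at h; have := ih _ _ _ h; omega

-- B's correctness loop: non-paren char or negative balance ⇒ not ok.
def okAux : List Char → Int → Bool
  | [], _ => true
  | c :: r, b =>
    if c = '(' then (if b + 1 < 0 then false else okAux r (b + 1))
    else if c = ')' then (if b - 1 < 0 then false else okAux r (b - 1))
    else false

def loopB (s : List Char) (parts : List (List Char)) (sufs : List (List Char)) : List Char :=
  if hs : s = [] then (parts ++ sufs.reverse).flatten
  else
    match hm : findB s 0 0 with
    | none => (parts ++ sufs.reverse).flatten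
    | some m =>
      let u := s.take m
      if okAux u 0 then
        loopB (s.drop m) (parts ++ [u]) sufs
      else
        loopB (s.drop m) (parts ++ [['(']])
          (sufs ++ [')' :: ((u.drop 1).dropLast.map (fun c => if c = '(' then ')' else '('))])
termination_by s.length
decreasing_by
  all_goals
    (have h1 := findB_pos _ _ _ _ hm
     have h2 := List.length_pos_of_ne_nil hs
     simp only [List.length_drop]; omega)

def solution_alt (p : String) : String := String.ofList (loopB p.toList [] [])

-- ===== PRECONDITION & SPEC =====
def Spec_solution (p : String) (out : String) : Prop := out = solution_alt p
instance (p : String) (out : String) : Decidable (Spec_solution p out) := by unfold Spec_solution; infer_instance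

-- ===== CLAIM (what is proved, stated in full; the proofs are below) =====
def Claim_equal_solution : Prop := ∀ (p : String), Dom_solution p → Spec_solution p (solution p)

-- ===== LEMMAS AND PROOFS =====

-- proof-level recursive reformulation of B's loop (B's loop is proved equal to it below)
def dfsB (p : List Char) : List Char :=
  if hp : p = [] then []
  else
    match hm : findB p 0 0 with
    | none => []
    | some m =>
      let u := p.take m
      let v := p.drop m
      if okAux u 0 then u ++ dfsB v
      else '(' :: dfsB v ++ ')' :: ((u.drop 1).dropLast.map (fun c => if c = '(' then ')' else '('))
termination_by p.length
decreasing_by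
  all_goals
    (have h1 := findB_pos _ _ _ _ hm
     have h2 := List.length_pos_of_ne_nil hp
     simp only [List.length_drop]; omega)


def bal : List Char → Int
  | [] => 0
  | c :: r => (if c = '(' then 1 else if c = ')' then -1 else 0) + bal r

def AllParen (u : List Char) : Prop := ∀ c ∈ u, c = '(' ∨ c = ')'

def NonnegT (b : Int) (u : List Char) : Prop := ∀ n : Nat, 0 ≤ b + bal (u.take n)

theorem bal_nil : bal [] = 0 := rfl

theorem bal_cons (c : Char) (r : List Char) :
    bal (c :: r) = (if c = '(' then 1 else if c = ')' then -1 else 0) + bal r := rfl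

theorem bal_append (x y : List Char) : bal (x ++ y) = bal x + bal y := by
  induction x with
  | nil => simp [bal]
  | cons c r ih => simp only [List.cons_append, bal_cons, ih]; ring

theorem bal_counts (u : List Char) : bal u = (u.count '(' : Int) - (u.count ')' : Int) := by
  induction u with
  | nil => simp [bal]
  | cons c r ih =>
    simp only [bal_cons, ih, List.count_cons]
    by_cases h1 : c = '(' <;> by_cases h2 : c = ')' <;> simp [h1, h2] <;> omega

theorem dfsA_nil : dfsA [] = [] := by simp [dfsA]

theorem dfsB_nil : dfsB [] = [] := by simp [dfsB]

theorem find_eq : ∀ (l bs : List Char) (b : Int) (i : Nat), b = bal bs →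
    findA bs l i = findB l b i := by
  intro l
  induction l with
  | nil => intro bs b i h; simp [findA, findB]
  | cons c rest ih =>
    intro bs b i h
    simp only [findA, findB]
    have hb : (if c = '(' then b + 1 else if c = ')' then b - 1 else b) = bal (bs ++ [c]) := by
      rw [bal_append, h, bal_cons, bal_nil]
      by_cases h1 : c = '(' <;> by_cases h2 : c = ')' <;> simp [h1, h2] <;> ring
    have hcnt : ((bs ++ [c]).count '(' = (bs ++ [c]).count ')') ↔
        ((if c = '(' then b + 1 else if c = ')' then b - 1 else b) = 0) := by
      rw [hb, bal_counts]; omega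
    by_cases hc : (bs ++ [c]).count '(' = (bs ++ [c]).count ')'
    · rw [if_pos hc, if_pos (hcnt.mp hc)]
    · rw [if_neg hc, if_neg (fun h' => hc (hcnt.mpr h'))]
      exact ih _ _ _ hb

theorem findB_bal : ∀ (l : List Char) (b : Int) (i m : Nat), findB l b i = some m →
    m - i ≤ l.length ∧ b + bal (l.take (m - i)) = 0 := by
  intro l
  induction l with
  | nil => intro b i m h; simp [findB] at h
  | cons c rest ih =>
    intro b i m h
    simp only [findB] at h
    by_cases hz : (if c = '(' then b + 1 else if c = ')' then b - 1 else b) = 0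
    · rw [if_pos hz] at h
      simp only [Option.some.injEq] at h
      have hmi : m - i = 1 := by omega
      rw [hmi]
      refine ⟨by simp, ?_⟩
      simp only [List.take_succ_cons, List.take_zero, bal_cons, bal_nil]
      by_cases h1 : c = '(' <;> by_cases h2 : c = ')' <;> simp [h1, h2] at hz ⊢ <;> omega
    · rw [if_neg hz] at h
      have hpos := findB_pos _ _ _ _ h
      obtain ⟨h1, h2⟩ := ih _ _ _ h
      have hmi : m - i = (m - (i + 1)) + 1 := by omega
      rw [hmi]
      refine ⟨by simp only [List.length_cons]; omega, ?_⟩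
      simp only [List.take_succ_cons, bal_cons]
      by_cases hc1 : c = '(' <;> by_cases hc2 : c = ')' <;> simp [hc1, hc2] at h2 ⊢ <;> omega

theorem okAux_open (r : List Char) (b : Int) :
    okAux ('(' :: r) b = if b + 1 < 0 then false else okAux r (b + 1) := by
  simp [okAux]

theorem okAux_close (r : List Char) (b : Int) :
    okAux (')' :: r) b = if b - 1 < 0 then false else okAux r (b - 1) := by
  simp [okAux]

theorem okAux_other (c : Char) (r : List Char) (b : Int) (h1 : ¬ c = '(') (h2 : ¬ c = ')') :
    okAux (c :: r) b = false := by
  simp [okAux, h1, h2]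

theorem ok_iff : ∀ (u : List Char) (b : Int), 0 ≤ b →
    (okAux u b = true ↔ (AllParen u ∧ NonnegT b u)) := by
  intro u
  induction u with
  | nil =>
    intro b hb
    simp only [okAux, AllParen, NonnegT, List.take_nil, bal_nil]
    constructor
    · intro _; exact ⟨by simp, fun n => by omega⟩
    · intro _; trivial
  | cons c r ih =>
    intro b hb
    by_cases h1 : c = '('
    · subst h1
      have hb1 : (0:Int) ≤ b + 1 := by omega
      rw [okAux_open, if_neg (by omega : ¬ b + 1 < 0), ih _ hb1]
      constructor
      · rintro ⟨hap, hnn⟩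
        refine ⟨?_, ?_⟩
        · intro x hx
          rcases List.mem_cons.mp hx with hx | hx
          · left; exact hx
          · exact hap _ hx
        · intro n
          cases n with
          | zero => simpa [bal_nil] using hb
          | succ n =>
            have := hnn n
            simp only [List.take_succ_cons, bal_cons]
            norm_num
            omega
      · rintro ⟨hap, hnn⟩
        refine ⟨fun x hx => hap _ (List.mem_cons_of_mem _ hx), ?_⟩
        intro n
        have := hnn (n + 1)
        simp only [List.take_succ_cons, bal_cons] at this
        norm_num at this
        omega
    · by_cases h2 : c = ')'
      · subst h2
        rw [okAux_close]
        by_cases hneg : b - 1 < 0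
        · rw [if_pos hneg]
          constructor
          · intro h; cases h
          · rintro ⟨_, hnn⟩
            have := hnn 1
            simp only [List.take_succ_cons, List.take_zero, bal_cons, bal_nil] at this
            simp at this
            omega
        · have hb1 : (0:Int) ≤ b - 1 := by omega
          rw [if_neg hneg, ih _ hb1]
          constructor
          · rintro ⟨hap, hnn⟩
            refine ⟨?_, ?_⟩
            · intro x hx
              rcases List.mem_cons.mp hx with hx | hx
              · right; exact hx
              · exact hap _ hx
            · intro n
              cases n with
              | zero => simpa [bal_nil] using hb
              | succ n =>
                have := hnn n
                simp only [List.take_succ_cons, bal_cons]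
                norm_num
                omega
          · rintro ⟨hap, hnn⟩
            refine ⟨fun x hx => hap _ (List.mem_cons_of_mem _ hx), ?_⟩
            intro n
            have := hnn (n + 1)
            simp only [List.take_succ_cons, bal_cons] at this
            simp at this
            omega
      · rw [okAux_other c r b h1 h2]
        constructor
        · intro h; cases h
        · rintro ⟨hap, _⟩
          rcases hap c List.mem_cons_self with h | h
          · exact absurd h h1
          · exact absurd h h2

theorem repl1_pair (r : List Char) : repl1 ('(' :: ')' :: r) = r := by
  simp [repl1]

theorem repl1_cons (c d : Char) (r : List Char) (h : ¬ (c = '(' ∧ d = ')')) :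
    repl1 (c :: d :: r) = c :: repl1 (d :: r) := by
  simp [repl1, h]

theorem repl1_cases : ∀ u : List Char,
    repl1 u = u ∨ ∃ x y, u = x ++ '(' :: ')' :: y ∧ repl1 u = x ++ y := by
  intro u
  induction u using repl1.induct with
  | case1 => left; rfl
  | case2 c => left; rfl
  | case3 c d r h =>
    obtain ⟨hc, hd⟩ := h
    subst hc; subst hd
    right
    exact ⟨[], r, by simp, by simp [repl1_pair]⟩
  | case4 c d r h ih =>
    rcases ih with heq | ⟨x, y, hxy, hre⟩
    · left; rw [repl1_cons c d r h, heq]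
    · right
      refine ⟨c :: x, y, by simp [hxy], ?_⟩
      rw [repl1_cons c d r h, hre]
      simp

theorem repl1_all_open : ∀ (x y : List Char), (∀ c ∈ x, c = '(') →
    repl1 (x ++ '(' :: ')' :: y) = x ++ y := by
  intro x
  induction x with
  | nil => intro y _; simpa using repl1_pair y
  | cons c x' ih =>
    intro y hall
    have hc : c = '(' := hall c List.mem_cons_self
    subst hc
    have hx' : ∀ c ∈ x', c = '(' := fun c hc => hall c (List.mem_cons_of_mem _ hc)
    cases x' with
    | nil =>
      simp only [List.nil_append, List.cons_append]
      rw [repl1_cons _ _ _ (by simp), repl1_pair]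
    | cons d r =>
      have hd : d = '(' := hx' d List.mem_cons_self
      subst hd
      simp only [List.cons_append]
      rw [repl1_cons '(' '(' _ (by simp)]
      have := ih y hx'
      simp only [List.cons_append] at this
      rw [this]

theorem allparen_open_bal (u : List Char) (h : ∀ c ∈ u, c = '(') : bal u = u.length := by
  induction u with
  | nil => simp [bal]
  | cons c r ih =>
    have hc : c = '(' := h c List.mem_cons_self
    subst hc
    rw [bal_cons, ih (fun c hc => h c (List.mem_cons_of_mem _ hc))]
    simp only [List.length_cons]
    push_cast
    ring

theorem allparen_length (u : List Char) (h : AllParen u) :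
    u.length = u.count '(' + u.count ')' := by
  induction u with
  | nil => simp
  | cons c r ih =>
    have hr := ih (fun c hc => h c (List.mem_cons_of_mem _ hc))
    rcases h c List.mem_cons_self with hc | hc <;> subst hc <;>
      simp [List.count_cons, hr] <;> omega

theorem exists_first_close (u : List Char) (h : ')' ∈ u) :
    ∃ x y, u = x ++ ')' :: y ∧ ')' ∉ x := by
  induction u with
  | nil => cases h
  | cons c r ih =>
    by_cases hc : c = ')'
    · exact ⟨[], r, by simp [hc], by simp⟩
    · have hr : ')' ∈ r := by
        rcases List.mem_cons.mp h with h' | h'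
        · exact absurd h'.symm hc
        · exact h'
      obtain ⟨x, y, hxy, hnx⟩ := ih hr
      refine ⟨c :: x, y, by simp [hxy], ?_⟩
      simp only [List.mem_cons, not_or]
      exact ⟨fun h' => hc h'.symm, hnx⟩

theorem correct_step (u : List Char) (hap : AllParen u) (hnn : NonnegT 0 u)
    (hb : bal u = 0) (hne : u ≠ []) :
    ∃ x y, u = x ++ '(' :: ')' :: y ∧ (∀ c ∈ x, c = '(') := by
  have hmem : ')' ∈ u := by
    by_contra hno
    have hop : ∀ c ∈ u, c = '(' := by
      intro c hc
      rcases hap c hc with h | h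
      · exact h
      · exact absurd (h ▸ hc) hno
    have h1 := allparen_open_bal u hop
    rw [hb] at h1
    have : u.length = 0 := by omega
    exact hne (List.eq_nil_of_length_eq_zero this)
  obtain ⟨x, y, hxy, hnx⟩ := exists_first_close u hmem
  have hxop : ∀ c ∈ x, c = '(' := by
    intro c hc
    rcases hap c (hxy ▸ List.mem_append_left _ hc) with h | h
    · exact h
    · exact absurd (h ▸ hc) hnx
  have hxne : x ≠ [] := by
    intro hx
    subst hx
    have := hnn 1
    rw [hxy] at this
    simp only [List.nil_append, List.take_succ_cons, List.take_zero, bal_cons, bal_nil] at this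
    simp at this
  obtain ⟨x', hlast⟩ : ∃ x', x = x' ++ ['('] := by
    rcases List.eq_nil_or_concat x with h | ⟨x', a, hx'⟩
    · exact absurd h hxne
    · have ha : a = '(' := hxop a (by rw [hx']; simp)
      exact ⟨x', by rw [hx', ha]; simp⟩
  refine ⟨x', y, ?_, fun c hc => hxop c (hlast ▸ List.mem_append_left _ hc)⟩
  rw [hxy, hlast]
  simp

-- removing a "()" pair preserves correctness
theorem remove_preserves (x y : List Char)
    (hap : AllParen (x ++ '(' :: ')' :: y)) (hnn : NonnegT 0 (x ++ '(' :: ')' :: y))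
    (hb : bal (x ++ '(' :: ')' :: y) = 0) :
    AllParen (x ++ y) ∧ NonnegT 0 (x ++ y) ∧ bal (x ++ y) = 0 := by
  have hbxy : bal (x ++ y) = 0 := by
    rw [bal_append] at hb ⊢
    simp only [bal_cons] at hb
    simp at hb
    omega
  refine ⟨?_, ?_, hbxy⟩
  · intro c hc
    apply hap
    rcases List.mem_append.mp hc with h | h
    · exact List.mem_append_left _ h
    · exact List.mem_append_right _ (by simp [h])
  · intro n
    by_cases hn : n ≤ x.length
    · have h1 : (x ++ y).take n = x.take n := by
        rw [List.take_append]
        simp [Nat.sub_eq_zero_of_le hn]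
      have h2 : (x ++ '(' :: ')' :: y).take n = x.take n := by
        rw [List.take_append]
        simp [Nat.sub_eq_zero_of_le hn]
      have := hnn n
      rw [h2] at this
      rw [h1]
      exact this
    · have h1 : (x ++ y).take n = x ++ y.take (n - x.length) := by
        rw [List.take_append, List.take_of_length_le (by omega)]
      have h2 : (x ++ '(' :: ')' :: y).take (n + 2) = x ++ '(' :: ')' :: y.take (n - x.length) := by
        rw [List.take_append, List.take_of_length_le (by omega)]
        congr 1
        have he : n + 2 - x.length = (n - x.length) + 1 + 1 := by omega
        rw [he]
        simp [List.take_succ_cons]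
      have := hnn (n + 2)
      rw [h2] at this
      rw [h1]
      rw [bal_append] at this ⊢
      simp only [bal_cons] at this
      simp at this
      omega

-- inserting a "()" pair preserves correctness
theorem insert_preserves (x y : List Char)
    (hap : AllParen (x ++ y)) (hnn : NonnegT 0 (x ++ y)) (hb : bal (x ++ y) = 0) :
    AllParen (x ++ '(' :: ')' :: y) ∧ NonnegT 0 (x ++ '(' :: ')' :: y) ∧
      bal (x ++ '(' :: ')' :: y) = 0 := by
  have hbx : 0 ≤ bal x := by
    have := hnn x.length
    rw [List.take_append, List.take_of_length_le (le_refl _)] at this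
    simpa using this
  refine ⟨?_, ?_, ?_⟩
  · intro c hc
    rcases List.mem_append.mp hc with h | h
    · exact hap _ (List.mem_append_left _ h)
    · rcases List.mem_cons.mp h with h | h
      · left; exact h
      · rcases List.mem_cons.mp h with h | h
        · right; exact h
        · exact hap _ (List.mem_append_right _ h)
  · intro n
    by_cases hn : n ≤ x.length
    · have h2 : (x ++ '(' :: ')' :: y).take n = x.take n := by
        rw [List.take_append]
        simp [Nat.sub_eq_zero_of_le hn]
      have h1 : (x ++ y).take n = x.take n := by
        rw [List.take_append]
        simp [Nat.sub_eq_zero_of_le hn]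
      have := hnn n
      rw [h1] at this
      rw [h2]
      exact this
    · by_cases hn1 : n = x.length + 1
      · have h2 : (x ++ '(' :: ')' :: y).take n = x ++ ['('] := by
          rw [List.take_append, List.take_of_length_le (by omega), hn1]
          simp
        rw [h2, bal_append]
        simp only [bal_cons, bal_nil]
        simp
        omega
      · have h2 : (x ++ '(' :: ')' :: y).take n = x ++ '(' :: ')' :: y.take (n - x.length - 2) := by
          rw [List.take_append, List.take_of_length_le (by omega)]
          congr 1
          have he : n - x.length = (n - x.length - 2) + 1 + 1 := by omega
          rw [he]
          simp [List.take_succ_cons]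
        have h1 : (x ++ y).take (n - 2) = x ++ y.take (n - x.length - 2) := by
          rw [List.take_append, List.take_of_length_le (by omega)]
          congr 2
          omega
        have := hnn (n - 2)
        rw [h1] at this
        rw [h2]
        rw [bal_append] at this ⊢
        simp only [bal_cons] at this ⊢
        simp at this ⊢
        omega
  · rw [bal_append] at hb ⊢
    simp only [bal_cons]
    simp
    omega

theorem foldl_range_iterate (k : Nat) (u : List Char) :
    (List.range k).foldl (fun s _ => repl1 s) u = repl1^[k] u := by
  induction k generalizing u with
  | zero => simp
  | succ k ih =>
    rw [List.range_succ, List.foldl_append, ih, Function.iterate_succ_apply']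
    simp

theorem reduce_empty : ∀ (k : Nat) (u : List Char), AllParen u → NonnegT 0 u → bal u = 0 →
    u.length = 2 * k → repl1^[k] u = [] := by
  intro k
  induction k with
  | zero =>
    intro u _ _ _ hl
    simp at hl
    simp [hl]
  | succ k ih =>
    intro u hap hnn hb hl
    have hne : u ≠ [] := by
      intro h; subst h; simp at hl
    obtain ⟨x, y, hxy, hxop⟩ := correct_step u hap hnn hb hne
    subst hxy
    have hr : repl1 (x ++ '(' :: ')' :: y) = x ++ y := repl1_all_open x y hxop
    obtain ⟨hap', hnn', hb'⟩ := remove_preserves x y hap hnn hb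
    rw [Function.iterate_succ_apply, hr]
    apply ih _ hap' hnn' hb'
    simp at hl ⊢
    omega

theorem empty_correct : ∀ (k : Nat) (u : List Char), repl1^[k] u = [] →
    AllParen u ∧ NonnegT 0 u ∧ bal u = 0 := by
  intro k
  induction k with
  | zero =>
    intro u h
    simp at h
    subst h
    exact ⟨by simp [AllParen], fun n => by simp [bal_nil], by simp [bal_nil]⟩
  | succ k ih =>
    intro u h
    rw [Function.iterate_succ_apply] at h
    have hr := ih _ h
    rcases repl1_cases u with heq | ⟨x, y, hxy, hre⟩
    · rw [heq] at hr; exact hr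
    · rw [hre] at hr
      rw [hxy]
      exact insert_preserves x y hr.1 hr.2.1 hr.2.2

theorem dfsA_none (p : List Char) (hp : p ≠ []) (hm : findA [] p 0 = none) :
    dfsA p = [] ++ dfsA [] := by
  rw [dfsA, dif_neg hp]
  split
  · simp
  · rename_i m' h; rw [hm] at h; cases h

theorem dfsA_some (p : List Char) (hp : p ≠ []) (m : Nat) (hm : findA [] p 0 = some m) :
    dfsA p =
      (if (List.range ((p.take m).length / 2)).foldl (fun s _ => repl1 s) (p.take m) = []
       then p.take m ++ dfsA (p.drop m)
       else ('(' :: dfsA (p.drop m) ++ [')']) ++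
         (if (((p.take m).drop 1).dropLast).length ≠ 0
          then (((p.take m).drop 1).dropLast).map flipA else [])) := by
  rw [dfsA, dif_neg hp]
  split
  · rename_i h; rw [hm] at h; cases h
  · rename_i m' h
    rw [hm] at h
    injection h with h
    subst h
    rfl

theorem dfsB_none (p : List Char) (hp : p ≠ []) (hm : findB p 0 0 = none) :
    dfsB p = [] := by
  rw [dfsB, dif_neg hp]
  split
  · rfl
  · rename_i m' h; rw [hm] at h; cases h

theorem dfsB_some (p : List Char) (hp : p ≠ []) (m : Nat) (hm : findB p 0 0 = some m) :
    dfsB p =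
      (if okAux (p.take m) 0 then p.take m ++ dfsB (p.drop m)
       else '(' :: dfsB (p.drop m) ++
         ')' :: (((p.take m).drop 1).dropLast.map (fun c => if c = '(' then ')' else '('))) := by
  rw [dfsB, dif_neg hp]
  split
  · rename_i h; rw [hm] at h; cases h
  · rename_i m' h
    rw [hm] at h
    injection h with h
    subst h
    rfl

theorem dfs_eq : ∀ (n : Nat) (p : List Char), p.length ≤ n → dfsA p = dfsB p := by
  intro n
  induction n with
  | zero =>
    intro p hp
    have : p = [] := List.eq_nil_of_length_eq_zero (by omega)
    subst this
    rw [dfsA_nil, dfsB_nil]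
  | succ n ih =>
    intro p hlen
    by_cases hp : p = []
    · subst hp; rw [dfsA_nil, dfsB_nil]
    · have hfind : findA [] p 0 = findB p 0 0 := find_eq p [] 0 0 (by simp [bal_nil])
      cases hm : findB p 0 0 with
      | none =>
        rw [dfsA_none p hp (hfind.trans hm), dfsB_none p hp hm, dfsA_nil]
        rfl
      | some m =>
        rw [dfsA_some p hp m (hfind.trans hm), dfsB_some p hp m hm]
        have hbal : bal (p.take m) = 0 := by
          have := (findB_bal _ _ _ _ hm).2
          simpa using this
        have hvlen : (p.drop m).length ≤ n := by
          have h2 := List.length_pos_of_ne_nil hp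
          have hpos := findB_pos _ _ _ _ hm
          simp only [List.length_drop]
          omega
        have hrec := ih (p.drop m) hvlen
        set u := p.take m with hu
        by_cases hok : okAux u 0 = true
        · obtain ⟨hap, hnn⟩ := (ok_iff u 0 (le_refl 0)).mp hok
          have hklen : u.length = 2 * (u.length / 2) := by
            have h1 := allparen_length u hap
            have h2 := bal_counts u
            rw [hbal] at h2
            omega
          have hchk : (List.range (u.length / 2)).foldl (fun s _ => repl1 s) u = [] := by
            rw [foldl_range_iterate]
            exact reduce_empty _ u hap hnn hbal hklen
          rw [if_pos hchk, if_pos hok, hrec]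
        · have hchk : ¬ ((List.range (u.length / 2)).foldl (fun s _ => repl1 s) u = []) := by
            intro hemp
            rw [foldl_range_iterate] at hemp
            obtain ⟨hap, hnn, _⟩ := empty_correct _ _ hemp
            exact hok ((ok_iff u 0 (le_refl 0)).mpr ⟨hap, hnn⟩)
          have hokf : okAux u 0 = false := by simpa using hok
          rw [if_neg hchk, hokf, hrec]
          simp only [Bool.false_eq_true, if_false]
          by_cases htr : ((u.drop 1).dropLast).length ≠ 0
          · rw [if_pos htr]
            simp only [List.cons_append, List.append_assoc, List.singleton_append]
            rfl
          · simp only [ne_eq, not_not] at htr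
            have h0 : (u.drop 1).dropLast = [] := List.eq_nil_of_length_eq_zero htr
            rw [if_neg (not_not_intro htr), h0]
            simp

theorem loopB_nil (parts sufs : List (List Char)) :
    loopB [] parts sufs = (parts ++ sufs.reverse).flatten := by
  rw [loopB]
  simp

theorem loopB_none (s : List Char) (hs : s ≠ []) (hm : findB s 0 0 = none)
    (parts sufs : List (List Char)) :
    loopB s parts sufs = (parts ++ sufs.reverse).flatten := by
  rw [loopB, dif_neg hs]
  split
  · rfl
  · rename_i m' h; rw [hm] at h; cases h

theorem loopB_some (s : List Char) (hs : s ≠ []) (m : Nat) (hm : findB s 0 0 = some m)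
    (parts sufs : List (List Char)) :
    loopB s parts sufs =
      (if okAux (s.take m) 0 then loopB (s.drop m) (parts ++ [s.take m]) sufs
       else loopB (s.drop m) (parts ++ [['(']])
         (sufs ++ [')' :: (((s.take m).drop 1).dropLast.map (fun c => if c = '(' then ')' else '('))])) := by
  rw [loopB, dif_neg hs]
  split
  · rename_i h; rw [hm] at h; cases h
  · rename_i m' h
    rw [hm] at h
    injection h with h
    subst h
    rfl

theorem loop_spec : ∀ (n : Nat) (s : List Char), s.length ≤ n → ∀ parts sufs : List (List Char),
    loopB s parts sufs = parts.flatten ++ dfsB s ++ sufs.reverse.flatten := by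
  intro n
  induction n with
  | zero =>
    intro s hs parts sufs
    have h0 : s = [] := List.eq_nil_of_length_eq_zero (by omega)
    subst h0
    rw [loopB_nil, dfsB_nil]
    simp
  | succ n ih =>
    intro s hlen parts sufs
    by_cases hs : s = []
    · subst hs
      rw [loopB_nil, dfsB_nil]
      simp
    · cases hm : findB s 0 0 with
      | none =>
        rw [loopB_none s hs hm, dfsB_none s hs hm]
        simp
      | some m =>
        have hvlen : (s.drop m).length ≤ n := by
          have h2 := List.length_pos_of_ne_nil hs
          have hpos := findB_pos _ _ _ _ hm
          simp only [List.length_drop]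
          omega
        rw [loopB_some s hs m hm, dfsB_some s hs m hm]
        by_cases hok : okAux (s.take m) 0 = true
        · rw [if_pos hok, if_pos hok, ih _ hvlen]
          simp
        · have hokf : okAux (s.take m) 0 = false := by simpa using hok
          rw [hokf]
          simp only [Bool.false_eq_true, if_false]
          rw [ih _ hvlen]
          simp

-- ===== VERDICT (by name: the statement is the Claim_ definition above) =====
theorem solution_spec : Claim_equal_solution := by
  intro p _
  unfold Spec_solution solution solution_alt
  rw [dfs_eq p.toList.length p.toList (le_refl _),
    loop_spec p.toList.length p.toList (le_refl _) [] []]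
  simp
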